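-- pv_equiv track=rewrite | github.com/jtg21/UC-Berkeley-Jasper-2048AI | AI_Heuristics.py | adjacent_score
-- ===== SOURCE A (Python) =====
-- COUNT_X = 4
--
-- COUNT_Y = 4
--
-- def adjacent_score(grid):
--     max_value = 0
--     values = {}
--     for x in range(COUNT_X):
--         for y in range(COUNT_Y):
--             cell_val = grid[y][x]
--             if max_value < cell_val and can_cell_be_merged(x, y, grid):
--                 if not values.get(cell_val):
--                     values[cell_val] = 1
--                 else:
--                     values[cell_val] *= cell_val
--     return values
--
-- def can_cell_be_merged(x, y, grid):
--     """Checks if a cell can be merged, when the """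
--     value = grid[y][x]
--     if y > 0 and grid[y - 1][x] == value:  # Cell above
--         return True
--     if y < COUNT_Y - 1 and grid[y + 1][x] == value:  # Cell below
--         return True
--     if x > 0 and grid[y][x - 1] == value:  # Left
--         return True
--     if x < COUNT_X - 1 and grid[y][x + 1] == value:  # Right
--         return True
--     return False
-- ===== SOURCE B (Python) =====
-- COUNT_X = 4
--
-- COUNT_Y = 4
--
-- def mergeable_cells(grid):
--     """Set of (x, y) positions that have an equal orthogonal neighbour,
--     found by scanning each horizontal and vertical edge of the grid once."""
--     mergeable = set()
--     for y in range(COUNT_Y):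
--         for x in range(COUNT_X - 1):
--             if grid[y][x] == grid[y][x + 1]:
--                 mergeable.update(((x, y), (x + 1, y)))
--     for x in range(COUNT_X):
--         for y in range(COUNT_Y - 1):
--             if grid[y][x] == grid[y + 1][x]:
--                 mergeable.update(((x, y), (x, y + 1)))
--     return mergeable
--
-- def adjacent_score(grid):
--     mergeable = mergeable_cells(grid)
--     vals = [grid[y][x] for x in range(COUNT_X) for y in range(COUNT_Y)
--             if grid[y][x] > 0 and (x, y) in mergeable]
--     return {v: v ** (vals.count(v) - 1) for v in vals}
-- ===== Notes on version B (the rewrite author's own statement) =====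
-- stated objective: alternative
-- what changed: B drops A's per-cell 4-neighbour if-chain test and its incremental first=1/then-multiply dict: it scans the 24 grid edges once to build a set of mergeable positions, collects the values of positive mergeable cells in A's traversal order into a list, and builds the result directly with the closed form v ** (count-1) keyed in first-occurrence order.
import Mathlib
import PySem

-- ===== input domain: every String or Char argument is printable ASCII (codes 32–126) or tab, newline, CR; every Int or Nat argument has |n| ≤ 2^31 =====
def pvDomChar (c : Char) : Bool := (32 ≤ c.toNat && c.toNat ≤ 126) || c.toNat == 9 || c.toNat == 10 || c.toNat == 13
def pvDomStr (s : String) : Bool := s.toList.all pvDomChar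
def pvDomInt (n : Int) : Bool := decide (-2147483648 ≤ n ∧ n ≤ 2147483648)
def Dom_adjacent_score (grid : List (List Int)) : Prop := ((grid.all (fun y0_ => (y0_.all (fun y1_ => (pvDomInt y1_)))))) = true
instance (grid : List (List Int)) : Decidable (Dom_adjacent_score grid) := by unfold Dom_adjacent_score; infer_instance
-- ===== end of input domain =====

-- B finds mergeable positions by one scan over the 24 grid edges into a set, then builds the
-- result with the closed form v ^ (count - 1), instead of A's per-cell neighbour if-chain and
-- incremental first=1/then-multiply dict (objective: alternative).


-- ===== PORT A =====
def pvCOUNT_X : Int := 4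
def pvCOUNT_Y : Int := 4

-- grid[y][x]; inside Pre_ the indices are always in range, so the default 0 is never taken
def pvCellA (grid : List (List Int)) (y x : Int) : Int :=
  PySem.List.pyGetD (PySem.List.pyGetD grid y []) x 0

def can_cell_be_merged (x y : Int) (grid : List (List Int)) : Bool :=
  let value := pvCellA grid y x
  if decide (y > 0) && (pvCellA grid (y - 1) x == value) then true
  else if decide (y < pvCOUNT_Y - 1) && (pvCellA grid (y + 1) x == value) then true
  else if decide (x > 0) && (pvCellA grid y (x - 1) == value) then true
  else if decide (x < pvCOUNT_X - 1) && (pvCellA grid y (x + 1) == value) then true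
  else false

def adjacent_score (grid : List (List Int)) : List (Int × Int) :=
  let max_value : Int := 0
  let values :=
    (PySem.List.pyRange 0 pvCOUNT_X 1).foldl (fun values x =>
      (PySem.List.pyRange 0 pvCOUNT_Y 1).foldl (fun values y =>
        let cell_val := pvCellA grid y x
        if decide (max_value < cell_val) && can_cell_be_merged x y grid then
          -- `if not values.get(cell_val)` : falsy = absent or 0
          match values.get? cell_val with
          | none => values.insert cell_val 1
          | some w => if w = 0 then values.insert cell_val 1
                      else values.insert cell_val (w * cell_val)
        else values) values) PySem.Dict.empty
  values.items

-- ===== PORT B =====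
def pvCellB (grid : List (List Int)) (y x : Int) : Int :=
  PySem.List.pyGetD (PySem.List.pyGetD grid y []) x 0

-- set of (x, y) positions with an equal orthogonal neighbour, one scan per grid edge
def mergeable_cells (grid : List (List Int)) : PySem.Set (Int × Int) :=
  let mergeable :=
    (PySem.List.pyRange 0 pvCOUNT_Y 1).foldl (fun s y =>
      (PySem.List.pyRange 0 (pvCOUNT_X - 1) 1).foldl (fun s x =>
        if pvCellB grid y x == pvCellB grid y (x + 1) then
          PySem.Set.update s [(x, y), (x + 1, y)] else s) s)
      PySem.Set.empty
  (PySem.List.pyRange 0 pvCOUNT_X 1).foldl (fun s x =>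
    (PySem.List.pyRange 0 (pvCOUNT_Y - 1) 1).foldl (fun s y =>
      if pvCellB grid y x == pvCellB grid (y + 1) x then
        PySem.Set.update s [(x, y), (x, y + 1)] else s) s)
    mergeable

def adjacent_score_alt (grid : List (List Int)) : List (Int × Int) :=
  let mergeable := mergeable_cells grid
  let vals : List Int :=
    (PySem.List.pyRange 0 pvCOUNT_X 1).flatMap (fun x =>
      (PySem.List.pyRange 0 pvCOUNT_Y 1).filterMap (fun y =>
        if decide (pvCellB grid y x > 0) && mergeable.contains (x, y) then
          some (pvCellB grid y x) else none))
  -- {v: v ** (vals.count(v) - 1) for v in vals}; every v in vals occurs, so the exponent is ≥ 0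
  (vals.foldl (fun d v => d.insert v (v ^ (vals.count v - 1)))
      (PySem.Dict.empty : PySem.Dict Int Int)).items

-- ===== PRECONDITION & SPEC =====
-- Pre_ excludes exactly the grids on which A raises IndexError: fewer than 4 rows, or one of the first 4 rows shorter than 4.
def Pre_adjacent_score (grid : List (List Int)) : Prop :=
  4 ≤ grid.length ∧ ∀ row ∈ grid.take 4, 4 ≤ row.length
instance (grid : List (List Int)) : Decidable (Pre_adjacent_score grid) := by unfold Pre_adjacent_score; infer_instance

def pvWitness_adjacent_score : List (List Int) :=
  [[2, 2, 0, 4], [0, 2, 4, 4], [8, 0, 0, 0], [8, 3, 3, 3]]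

def Spec_adjacent_score (grid : List (List Int)) (out : List (Int × Int)) : Prop := out = adjacent_score_alt grid
instance (grid : List (List Int)) (out : List (Int × Int)) : Decidable (Spec_adjacent_score grid out) := by unfold Spec_adjacent_score; infer_instance

-- ===== CLAIM (what is proved, stated in full; the proofs are below) =====
def Claim_equal_adjacent_score : Prop := ∀ (grid : List (List Int)), Dom_adjacent_score grid → Pre_adjacent_score grid → Spec_adjacent_score grid (adjacent_score grid)

-- ===== LEMMAS AND PROOFS =====

-- proof-only helpers
def pvGuard (grid : List (List Int)) (p : Int × Int) : Bool :=
  decide ((0 : Int) < pvCellA grid p.2 p.1) && can_cell_be_merged p.1 p.2 grid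

def pvF (grid : List (List Int)) (p : Int × Int) : Option Int :=
  if pvGuard grid p then some (pvCellA grid p.2 p.1) else none

def pvStepA (d : PySem.Dict Int Int) (v : Int) : PySem.Dict Int Int :=
  match d.get? v with
  | none => d.insert v 1
  | some w => if w = 0 then d.insert v 1 else d.insert v (w * v)

-- nested for/for loops as one fold over the pair list
theorem pv_nested_eq_pairs {α : Type} (xs ys : List Int) (f : α → Int → Int → α) (init : α) :
    xs.foldl (fun a x => ys.foldl (fun a y => f a x y) a) init
      = (xs.flatMap (fun x => ys.map (fun y => (x, y)))).foldl (fun a p => f a p.1 p.2) init := by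
  induction xs generalizing init with
  | nil => rfl
  | cons x xs ih =>
      simp only [List.flatMap_cons, List.foldl_append, List.foldl_cons, List.foldl_map, ih]

def pvPairs : List (Int × Int) :=
  [(0, 0), (0, 1), (0, 2), (0, 3), (1, 0), (1, 1), (1, 2), (1, 3),
   (2, 0), (2, 1), (2, 2), (2, 3), (3, 0), (3, 1), (3, 2), (3, 3)]

def pvVals (grid : List (List Int)) : List Int := pvPairs.filterMap (pvF grid)

theorem pv_pairs_eq :
    ((PySem.List.pyRange 0 pvCOUNT_X 1).flatMap
      (fun x => (PySem.List.pyRange 0 pvCOUNT_Y 1).map (fun y => (x, y)))) = pvPairs := by decide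

-- the horizontal-edge loop pairs (y, x) and the vertical-edge loop pairs (x, y)
def pvHE : List (Int × Int) :=
  [(0, 0), (0, 1), (0, 2), (1, 0), (1, 1), (1, 2),
   (2, 0), (2, 1), (2, 2), (3, 0), (3, 1), (3, 2)]

def pvVE : List (Int × Int) :=
  [(0, 0), (0, 1), (0, 2), (1, 0), (1, 1), (1, 2),
   (2, 0), (2, 1), (2, 2), (3, 0), (3, 1), (3, 2)]

theorem pv_he_eq :
    ((PySem.List.pyRange 0 pvCOUNT_Y 1).flatMap
      (fun y => (PySem.List.pyRange 0 (pvCOUNT_X - 1) 1).map (fun x => (y, x)))) = pvHE := by decide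

theorem pv_ve_eq :
    ((PySem.List.pyRange 0 pvCOUNT_X 1).flatMap
      (fun x => (PySem.List.pyRange 0 (pvCOUNT_Y - 1) 1).map (fun y => (x, y)))) = pvVE := by decide

-- membership in a conditional two-element set-update loop
theorem pv_mem_fold_update {β : Type} (es : List β) (cond : β → Bool)
    (f g : β → Int × Int) (s0 : PySem.Set (Int × Int)) (p : Int × Int) :
    (p ∈ es.foldl (fun s e => if cond e then PySem.Set.update s [f e, g e] else s) s0) ↔
      p ∈ s0 ∨ ∃ e ∈ es, cond e = true ∧ (p = f e ∨ p = g e) := by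
  induction es generalizing s0 with
  | nil => simp
  | cons e es ih =>
      simp only [List.foldl_cons]
      by_cases h : cond e = true
      · rw [if_pos h, ih]
        simp only [PySem.Set.mem_update, List.mem_cons, List.not_mem_nil, or_false]
        constructor
        · rintro ((hs | hp) | ⟨e', he', hc, hp⟩)
          · exact Or.inl hs
          · exact Or.inr ⟨e, Or.inl rfl, h, hp⟩
          · exact Or.inr ⟨e', Or.inr he', hc, hp⟩
        · rintro (hs | ⟨e', he', hc, hp⟩)
          · exact Or.inl (Or.inl hs)
          · rcases he' with rfl | he'
            · exact Or.inl (Or.inr hp)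
            · exact Or.inr ⟨e', he', hc, hp⟩
      · rw [if_neg h, ih]
        constructor
        · rintro (hs | ⟨e', he', hc, hp⟩)
          · exact Or.inl hs
          · exact Or.inr ⟨e', List.mem_cons_of_mem _ he', hc, hp⟩
        · rintro (hs | ⟨e', he', hc, hp⟩)
          · exact Or.inl hs
          · rcases List.mem_cons.mp he' with rfl | he''
            · exact absurd hc h
            · exact Or.inr ⟨e', he'', hc, hp⟩

theorem pv_flatMap_filterMap (xs ys : List Int) (g : Int → Int → Option Int) :
    (xs.flatMap fun x => ys.filterMap fun y => g x y)
      = ((xs.flatMap fun x => ys.map fun y => (x, y)).filterMap (fun p => g p.1 p.2)) := by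
  induction xs with
  | nil => rfl
  | cons x xs ih => simp [List.filterMap_append, List.filterMap_map, ih, Function.comp]

theorem pv_mem_mergeable (grid : List (List Int)) (p : Int × Int) :
    (p ∈ mergeable_cells grid) ↔
      ((∃ e ∈ pvHE, (pvCellB grid e.1 e.2 == pvCellB grid e.1 (e.2 + 1)) = true ∧
          (p = (e.2, e.1) ∨ p = (e.2 + 1, e.1))) ∨
       (∃ e ∈ pvVE, (pvCellB grid e.2 e.1 == pvCellB grid (e.2 + 1) e.1) = true ∧
          (p = (e.1, e.2) ∨ p = (e.1, e.2 + 1)))) := by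
  show p ∈ ((PySem.List.pyRange 0 pvCOUNT_X 1).foldl (fun s x =>
      (PySem.List.pyRange 0 (pvCOUNT_Y - 1) 1).foldl (fun s y =>
        if pvCellB grid y x == pvCellB grid (y + 1) x then
          PySem.Set.update s [(x, y), (x, y + 1)] else s) s)
      ((PySem.List.pyRange 0 pvCOUNT_Y 1).foldl (fun s y =>
        (PySem.List.pyRange 0 (pvCOUNT_X - 1) 1).foldl (fun s x =>
          if pvCellB grid y x == pvCellB grid y (x + 1) then
            PySem.Set.update s [(x, y), (x + 1, y)] else s) s)
        PySem.Set.empty)) ↔ _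
  rw [pv_nested_eq_pairs, pv_nested_eq_pairs, pv_he_eq, pv_ve_eq,
    pv_mem_fold_update, pv_mem_fold_update]
  simp only [PySem.Set.empty, List.not_mem_nil, false_or]

theorem pvCellB_eq : pvCellB = pvCellA := rfl

theorem pv_can_iff (grid : List (List Int)) (x y : Int) :
    can_cell_be_merged x y grid = true ↔
      ((0 < y ∧ pvCellA grid (y - 1) x = pvCellA grid y x) ∨
       (y < 3 ∧ pvCellA grid y x = pvCellA grid (y + 1) x) ∨
       (0 < x ∧ pvCellA grid y (x - 1) = pvCellA grid y x) ∨
       (x < 3 ∧ pvCellA grid y x = pvCellA grid y (x + 1))) := by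
  simp only [can_cell_be_merged, pvCOUNT_X, pvCOUNT_Y, Bool.if_true_left, Bool.if_false_right,
    Bool.or_eq_true, Bool.and_eq_true, decide_eq_true_eq, beq_iff_eq, gt_iff_lt]
  constructor
  · rintro (⟨h, e⟩ | ⟨h, e⟩ | ⟨h, e⟩ | ⟨⟨h, e⟩, -⟩)
    · exact Or.inl ⟨h, e⟩
    · exact Or.inr (Or.inl ⟨by omega, e.symm⟩)
    · exact Or.inr (Or.inr (Or.inl ⟨h, e⟩))
    · exact Or.inr (Or.inr (Or.inr ⟨by omega, e.symm⟩))
  · rintro (⟨h, e⟩ | ⟨h, e⟩ | ⟨h, e⟩ | ⟨h, e⟩)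
    · exact Or.inl ⟨h, e⟩
    · exact Or.inr (Or.inl ⟨by omega, e.symm⟩)
    · exact Or.inr (Or.inr (Or.inl ⟨h, e⟩))
    · exact Or.inr (Or.inr (Or.inr ⟨⟨by omega, e.symm⟩, trivial⟩))

set_option maxHeartbeats 1000000 in
theorem pv_contains_eq_can (grid : List (List Int)) : ∀ p ∈ pvPairs,
    (mergeable_cells grid).contains p = can_cell_be_merged p.1 p.2 grid := by
  intro p hp
  have hiff := pv_mem_mergeable grid p
  rw [← PySem.Set.contains_iff] at hiff
  fin_cases hp <;>
  · rw [Bool.eq_iff_iff, hiff, pv_can_iff]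
    simp [pvHE, pvVE, pvCellB_eq]
    tauto

-- A's nested loops are the fold of pvStepA over the filtered value list
theorem pv_eA (grid : List (List Int)) :
    adjacent_score grid = ((pvVals grid).foldl pvStepA PySem.Dict.empty).items := by
  show ((PySem.List.pyRange 0 pvCOUNT_X 1).foldl (fun values x =>
      (PySem.List.pyRange 0 pvCOUNT_Y 1).foldl (fun values y =>
        let cell_val := pvCellA grid y x
        if decide ((0 : Int) < cell_val) && can_cell_be_merged x y grid then
          match values.get? cell_val with
          | none => values.insert cell_val 1
          | some w => if w = 0 then values.insert cell_val 1
                      else values.insert cell_val (w * cell_val)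
        else values) values) PySem.Dict.empty).items = _
  rw [pv_nested_eq_pairs, pv_pairs_eq]
  unfold pvVals
  rw [List.foldl_filterMap]
  congr 1
  apply PySem.List.foldl_congr_mem
  intro acc p _
  by_cases hg : pvGuard grid p = true
  · have hg' : (decide ((0 : Int) < pvCellA grid p.2 p.1) && can_cell_be_merged p.1 p.2 grid) = true := hg
    simp only [pvF, hg, hg', if_true, pvStepA]
  · have hg3 : pvGuard grid p = false := Bool.of_not_eq_true hg
    have hg2 : (decide ((0 : Int) < pvCellA grid p.2 p.1) && can_cell_be_merged p.1 p.2 grid) = false := by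
      unfold pvGuard at hg3; exact hg3
    simp only [pvF, hg3, hg2, Bool.false_eq_true, if_false]

theorem pv_eB (grid : List (List Int)) :
    adjacent_score_alt grid
      = (((pvVals grid).foldl
            (fun d v => d.insert v (v ^ ((pvVals grid).count v - 1)))
            (PySem.Dict.empty : PySem.Dict Int Int)).items) := by
  have hv : ((PySem.List.pyRange 0 pvCOUNT_X 1).flatMap (fun x =>
      (PySem.List.pyRange 0 pvCOUNT_Y 1).filterMap (fun y =>
        if decide (pvCellB grid y x > 0) && (mergeable_cells grid).contains (x, y) then
          some (pvCellB grid y x) else none))) = pvVals grid := by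
    rw [pv_flatMap_filterMap, pv_pairs_eq]
    unfold pvVals
    apply List.filterMap_congr
    intro p hp
    have hc := pv_contains_eq_can grid p hp
    rw [show ((p.1, p.2) : Int × Int) = p from rfl, hc]
    simp only [pvF, pvGuard, pvCellB, pvCellA, gt_iff_lt]
    rfl
  show (((PySem.List.pyRange 0 pvCOUNT_X 1).flatMap (fun x =>
      (PySem.List.pyRange 0 pvCOUNT_Y 1).filterMap (fun y =>
        if decide (pvCellB grid y x > 0) && (mergeable_cells grid).contains (x, y) then
          some (pvCellB grid y x) else none))).foldl
      (fun d v => d.insert v (v ^ (((PySem.List.pyRange 0 pvCOUNT_X 1).flatMap (fun x =>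
        (PySem.List.pyRange 0 pvCOUNT_Y 1).filterMap (fun y =>
          if decide (pvCellB grid y x > 0) && (mergeable_cells grid).contains (x, y) then
            some (pvCellB grid y x) else none))).count v - 1)))
      (PySem.Dict.empty : PySem.Dict Int Int)).items = _
  rw [hv]

theorem pv_vals_pos (grid : List (List Int)) : ∀ v ∈ pvVals grid, 0 < v := by
  intro v hv
  obtain ⟨p, _, hf⟩ := List.mem_filterMap.mp hv
  unfold pvF at hf
  by_cases hg : pvGuard grid p = true
  · rw [if_pos hg] at hf
    obtain rfl := Option.some.inj hf
    exact of_decide_eq_true (Bool.and_elim_left hg)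
  · rw [if_neg hg] at hf
    cases hf

theorem pv_items_foldA (l : List Int) (hpos : ∀ v ∈ l, 0 < v) :
    (l.foldl pvStepA PySem.Dict.empty).items
      = (PySem.Set.ofList l).map (fun v => (v, v ^ (l.count v - 1))) := by
  induction l using List.reverseRecOn with
  | nil => rfl
  | append_singleton l x ih =>
      have hpos' : ∀ v ∈ l, 0 < v := fun v hv => hpos v (List.mem_append_left _ hv)
      have hxpos : 0 < x := hpos x (List.mem_append_right _ List.mem_cons_self)
      have ihh := ih hpos'
      rw [List.foldl_append, List.foldl_cons, List.foldl_nil, PySem.Set.ofList_append_singleton]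
      have hkeys : (l.foldl pvStepA PySem.Dict.empty).keys = PySem.Set.ofList l := by
        simp [PySem.Dict.keys, ihh, List.map_map, Function.comp_def]
      have hnd : (l.foldl pvStepA PySem.Dict.empty).keys.Nodup := hkeys ▸ PySem.Set.nodup_ofList l
      by_cases hx : x ∈ l
      · have hmemS : x ∈ PySem.Set.ofList l := (PySem.Set.mem_ofList l x).mpr hx
        have hmem : (x, x ^ (l.count x - 1)) ∈ (l.foldl pvStepA PySem.Dict.empty).items := by
          rw [ihh]; exact List.mem_map.mpr ⟨x, hmemS, rfl⟩
        have hget : (l.foldl pvStepA PySem.Dict.empty).get? x = some (x ^ (l.count x - 1)) :=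
          PySem.Dict.get?_of_mem_items _ hmem hnd
        have hne : x ^ (l.count x - 1) ≠ 0 := ne_of_gt (pow_pos hxpos _)
        have hcont : (l.foldl pvStepA PySem.Dict.empty).contains x = true := by
          rw [PySem.Dict.contains_eq_isSome_get?, hget]; rfl
        show (pvStepA _ x).items = _
        simp only [pvStepA, hget]
        rw [if_neg hne, PySem.Dict.items_insert_of_contains _ _ hcont, ihh,
          PySem.Set.add_of_mem hmemS, List.map_map]
        apply List.map_congr_left
        intro v hv
        by_cases hvx : v = x
        · subst hvx
          have hcnt : 0 < l.count v := List.count_pos_iff.mpr ((PySem.Set.mem_ofList l v).mp hv)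
          simp only [Function.comp, beq_self_eq_true, if_true]
          have h1 : (l ++ [v]).count v = l.count v + 1 := by
            rw [List.count_append]; simp
          rw [h1]
          have h2 : l.count v + 1 - 1 = (l.count v - 1) + 1 := by omega
          rw [h2, pow_succ]
        · have hb : (v == x) = false := by simp [hvx]
          have h0 : List.count v [x] = 0 := List.count_eq_zero.mpr (by simp [hvx])
          have h1 : (l ++ [x]).count v = l.count v := by
            rw [List.count_append, h0]; omega
          simp only [Function.comp, hb, Bool.false_eq_true, if_false, h1]
      · have hnmemS : x ∉ PySem.Set.ofList l := fun h => hx ((PySem.Set.mem_ofList l x).mp h)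
        have hget : (l.foldl pvStepA PySem.Dict.empty).get? x = none := by
          rw [PySem.Dict.get?_eq_none_iff_not_mem_keys, hkeys]; exact hnmemS
        have hcont : (l.foldl pvStepA PySem.Dict.empty).contains x = false := by
          rw [PySem.Dict.contains_eq_isSome_get?, hget]; rfl
        show (pvStepA _ x).items = _
        simp only [pvStepA, hget]
        rw [PySem.Dict.items_insert_of_not_contains _ _ hcont, ihh,
          PySem.Set.add_of_not_mem hnmemS, List.map_append]
        congr 1
        · apply List.map_congr_left
          intro v hv
          have hvx : v ≠ x := fun h => hx (h ▸ (PySem.Set.mem_ofList l v).mp hv)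
          have h0 : List.count v [x] = 0 := List.count_eq_zero.mpr (by simp [hvx])
          have h1 : (l ++ [x]).count v = l.count v := by
            rw [List.count_append, h0]; omega
          rw [h1]
        · simp [List.count_append, List.count_eq_zero.mpr hx]

theorem pv_items_foldB (l : List Int) (f : Int → Int) :
    (l.foldl (fun d v => d.insert v (f v)) (PySem.Dict.empty : PySem.Dict Int Int)).items
      = (PySem.Set.ofList l).map (fun v => (v, f v)) := by
  induction l using List.reverseRecOn with
  | nil => rfl
  | append_singleton l x ih =>
      rw [List.foldl_append, List.foldl_cons, List.foldl_nil, PySem.Set.ofList_append_singleton]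
      have hkeys : (l.foldl (fun d v => d.insert v (f v)) PySem.Dict.empty).keys
          = PySem.Set.ofList l := by
        simp [PySem.Dict.keys, ih, List.map_map, Function.comp_def]
      by_cases hx : x ∈ l
      · have hmemS : x ∈ PySem.Set.ofList l := (PySem.Set.mem_ofList l x).mpr hx
        have hcont : (l.foldl (fun d v => d.insert v (f v)) PySem.Dict.empty).contains x = true := by
          rw [PySem.Dict.contains_iff_mem_keys, hkeys]; exact hmemS  -- contains_iff_mem_keys may be an iff on =true
        rw [PySem.Dict.items_insert_of_contains _ _ hcont, ih,
          PySem.Set.add_of_mem hmemS, List.map_map]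
        apply List.map_congr_left
        intro v hv
        by_cases hvx : v = x
        · subst hvx; simp [Function.comp]
        · have hb : (v == x) = false := by simp [hvx]
          simp [Function.comp, hb]
      · have hnmemS : x ∉ PySem.Set.ofList l := fun h => hx ((PySem.Set.mem_ofList l x).mp h)
        have hcont : (l.foldl (fun d v => d.insert v (f v)) PySem.Dict.empty).contains x = false := by
          rw [PySem.Dict.contains_eq_decide_mem_keys, hkeys]; simp [hnmemS]
        rw [PySem.Dict.items_insert_of_not_contains _ _ hcont, ih,
          PySem.Set.add_of_not_mem hnmemS, List.map_append]
        rfl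

-- ===== VERDICT (by name: the statement is the Claim_ definition above) =====
theorem adjacent_score_spec : Claim_equal_adjacent_score := by
  intro grid _ _
  show adjacent_score grid = adjacent_score_alt grid
  rw [pv_eA, pv_eB, pv_items_foldA _ (pv_vals_pos grid), pv_items_foldB]
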